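-- pv_equiv track=rewrite | github.com/IsakJacobsson/adventofcode | 2025/day10/main.py | find_min_helper
-- ===== SOURCE A (Python) =====
-- def find_min_helper(goal, current, switches, depth, max_depth=5):
--     if goal == current:
--         return depth
--     if depth > max_depth:
--         return 1000
--
--     best = 1000
--     for i in range(len(switches)):
--         copy_current = current[:]
--         for s in switches[i]:
--             copy_current[s] = not copy_current[s]
--         copy_switches = switches[i + 1 :]  # No need to check different orders of clicks
--         best = min(
--             best,
--             find_min_helper(goal, copy_current, copy_switches, depth + 1, max_depth),
--         )
--     return best
-- ===== SOURCE B (Python) =====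
-- def find_min_helper(goal, current, switches, depth, max_depth=5):
--     if goal == current:
--         return depth
--     if depth > max_depth:
--         return 1000
--     limit = max_depth - depth + 1
--     # forward DP: state -> minimal number of switch presses (<= limit) to reach it
--     dp = {tuple(current): 0}
--     for sw in switches:
--         new = dict(dp)
--         for st, c in dp.items():
--             ns = list(st)
--             for s in sw:
--                 ns[s] = not ns[s]
--             ns = tuple(ns)
--             nc = c + 1
--             if nc <= limit and (ns not in new or new[ns] > nc):
--                 new[ns] = nc
--         dp = new
--     k = dp.get(tuple(goal))
--     if k is None:
--         return 1000
--     return min(1000, depth + k)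
-- ===== Notes on version B (the rewrite author's own statement) =====
-- stated objective: alternative
-- what changed: A's exponential depth-first recursion over suffix subsets of the switch list is replaced by a bottom-up dynamic programme: one left-to-right pass over the switches maintaining a dict from each reachable light state to its minimal press count (pruned at the depth budget), answering with a single lookup of the goal state.
import Mathlib
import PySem

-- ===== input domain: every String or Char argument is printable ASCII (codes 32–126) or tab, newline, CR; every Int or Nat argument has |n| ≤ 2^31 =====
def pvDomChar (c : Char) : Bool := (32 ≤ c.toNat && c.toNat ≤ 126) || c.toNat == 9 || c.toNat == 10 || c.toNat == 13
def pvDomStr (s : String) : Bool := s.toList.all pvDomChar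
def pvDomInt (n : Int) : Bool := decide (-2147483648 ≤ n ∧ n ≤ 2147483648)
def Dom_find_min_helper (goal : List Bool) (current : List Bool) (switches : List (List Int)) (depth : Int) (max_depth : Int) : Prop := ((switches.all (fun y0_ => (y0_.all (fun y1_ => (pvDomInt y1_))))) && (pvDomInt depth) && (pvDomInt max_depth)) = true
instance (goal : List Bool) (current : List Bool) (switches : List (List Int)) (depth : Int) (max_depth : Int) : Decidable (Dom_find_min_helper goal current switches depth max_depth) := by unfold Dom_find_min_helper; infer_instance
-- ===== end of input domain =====

-- B replaces A's exponential recursion over suffix subsets by a one-pass dynamic programme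
-- over a dict mapping each reachable light state to its minimal press count (pruned at the
-- depth budget); objective: alternative algorithm (memoised bottom-up instead of brute force).

-- ===== PORT A =====
-- copy_current[s] = not copy_current[s]  (Python index: negative wraps; out of range raises → outside Pre_, state kept)
def pyToggleIdx (c : List Bool) (s : Int) : List Bool :=
  match PySem.List.pyIdx? c.length s with
  | some i => c.set i (!c.getD i false)
  | none => c

mutual
def find_min_helper (goal : List Bool) (current : List Bool) (switches : List (List Int)) (depth : Int) (max_depth : Int) : Int :=
  if goal = current then depth
  else if depth > max_depth then 1000
  else fmhLoopA goal current switches depth max_depth 1000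
termination_by (switches.length, 1)
decreasing_by all_goals simp_wf <;> omega

-- the 'for i in range(len(switches))' loop: each step handles index i (head) with copy_switches = switches[i+1:] (tail)
def fmhLoopA (goal : List Bool) (current : List Bool) (switches : List (List Int)) (depth : Int) (max_depth : Int) (best : Int) : Int :=
  match switches with
  | [] => best
  | sw :: rest =>
    let copy_current := sw.foldl pyToggleIdx current
    let best' := min best (find_min_helper goal copy_current rest (depth + 1) max_depth)
    fmhLoopA goal current rest depth max_depth best'
termination_by (switches.length, 0)
decreasing_by all_goals simp_wf <;> omega
end

-- ===== PORT B =====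
-- inner loop of Source B: relax one candidate (st, c) of dp through switch sw into the dict `new`
def bstep (limit : Int) (sw : List Int) (new : PySem.Dict (List Bool) Int) (p : List Bool × Int) : PySem.Dict (List Bool) Int :=
  let ns := sw.foldl pyToggleIdx p.1
  let nc := p.2 + 1
  if nc ≤ limit then
    match new.get? ns with
    | none => new.insert ns nc
    | some v => if v > nc then new.insert ns nc else new
  else new

-- body of Source B's 'for sw in switches' loop: new = dict(dp); for st, c in dp.items(): ...
def bouter (limit : Int) (dp : PySem.Dict (List Bool) Int) (sw : List Int) : PySem.Dict (List Bool) Int :=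
  dp.items.foldl (bstep limit sw) dp

def find_min_helper_alt (goal : List Bool) (current : List Bool) (switches : List (List Int)) (depth : Int) (max_depth : Int) : Int :=
  if goal = current then depth
  else if depth > max_depth then 1000
  else
    let limit := max_depth - depth + 1
    let dpF := switches.foldl (bouter limit) (PySem.Dict.empty.insert current 0)
    match dpF.get? goal with
    | some k => min 1000 (depth + k)
    | none => 1000

-- ===== PRECONDITION & SPEC =====
-- Pre_ excludes exactly the inputs on which Python A raises IndexError: a switch names a
-- position outside range(-len(current), len(current)) while neither early return
-- (goal == current, or depth > max_depth) fires before the switches are pressed.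
def Pre_find_min_helper (goal : List Bool) (current : List Bool) (switches : List (List Int)) (depth : Int) (max_depth : Int) : Prop :=
  goal = current ∨ depth > max_depth ∨ ∀ sw ∈ switches, ∀ s ∈ sw, PySem.Raise.InRange current.length s
instance (goal : List Bool) (current : List Bool) (switches : List (List Int)) (depth : Int) (max_depth : Int) : Decidable (Pre_find_min_helper goal current switches depth max_depth) := by unfold Pre_find_min_helper; infer_instance

def pvWitness_find_min_helper : List Bool × List Bool × List (List Int) × Int × Int :=
  ([true, false], [false, false], [[0], [1]], 0, 5)

def Spec_find_min_helper (goal : List Bool) (current : List Bool) (switches : List (List Int)) (depth : Int) (max_depth : Int) (out : Int) : Prop := out = find_min_helper_alt goal current switches depth max_depth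
instance (goal : List Bool) (current : List Bool) (switches : List (List Int)) (depth : Int) (max_depth : Int) (out : Int) : Decidable (Spec_find_min_helper goal current switches depth max_depth out) := by unfold Spec_find_min_helper; infer_instance

-- ===== CLAIM (what is proved, stated in full; the proofs are below) =====
def Claim_equal_find_min_helper : Prop := ∀ (goal : List Bool) (current : List Bool) (switches : List (List Int)) (depth : Int) (max_depth : Int), Dom_find_min_helper goal current switches depth max_depth → Pre_find_min_helper goal current switches depth max_depth → Spec_find_min_helper goal current switches depth max_depth (find_min_helper goal current switches depth max_depth)

-- ===== LEMMAS AND PROOFS =====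

-- apply one switch to a state
def toggleAll (c : List Bool) (sw : List Int) : List Bool := sw.foldl pyToggleIdx c

-- min of two optional values (none = +infinity)
def omin : Option Int → Option Int → Option Int
  | none, b => b
  | some x, none => some x
  | some x, some y => some (min x y)

-- min of a list of values (none = empty)
def lmin : List Int → Option Int
  | [] => none
  | x :: xs => omin (some x) (lmin xs)

-- minimal number of switches of P (each usable once, applied in list order) turning c into g
def minTo (g c : List Bool) : List (List Int) → Option Int
  | [] => if g = c then some 0 else none
  | sw :: rest => omin (minTo g c rest) ((minTo g (toggleAll c sw) rest).map (· + 1))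

-- same, but over nonempty subsets only (what A's loop explores)
def minTo1 (g c : List Bool) : List (List Int) → Option Int
  | [] => none
  | sw :: rest => omin (minTo1 g c rest) ((minTo g (toggleAll c sw) rest).map (· + 1))

-- A's returned value for a press count k (depth budget + cap at 1000)
def clampL (md d : Int) : Option Int → Int
  | some k => if k ≤ md - d + 1 then min 1000 (d + k) else 1000
  | none => 1000

-- values ≤ lim survive, larger ones are as good as unreachable
def phi (lim : Int) : Option Int → Option Int
  | some v => if v ≤ lim then some v else none
  | none => none

theorem omin_eq_some (a b : Option Int) (m : Int) (h : omin a b = some m) :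
    a = some m ∨ b = some m := by
  rcases a with _ | x <;> rcases b with _ | y <;> simp_all [omin] <;> rcases min_choice x y with h' | h' <;> simp_all

theorem omin_le_left (x : Int) (b : Option Int) :
    ∃ m, omin (some x) b = some m ∧ m ≤ x := by
  rcases b with _ | y <;> simp [omin] <;> omega

theorem omin_le_right (a : Option Int) (y : Int) :
    ∃ m, omin a (some y) = some m ∧ m ≤ y := by
  rcases a with _ | x <;> simp [omin] <;> omega

theorem lmin_eq_none_iff (l : List Int) : lmin l = none ↔ l = [] := by
  induction l with
  | nil => simp [lmin]
  | cons x xs ih => rcases h : lmin xs with _ | v <;> simp [lmin, h, omin]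

theorem lmin_eq_some_iff (l : List Int) (v : Int) :
    lmin l = some v ↔ v ∈ l ∧ ∀ w ∈ l, v ≤ w := by
  induction l generalizing v with
  | nil => simp [lmin]
  | cons x xs ih =>
    rcases h : lmin xs with _ | m
    · have hxs : xs = [] := (lmin_eq_none_iff xs).1 h
      subst hxs
      simp only [lmin, omin]
      constructor
      · rintro hv
        have : x = v := by simpa using hv
        subst this
        exact ⟨by simp, by simp⟩
      · rintro ⟨hmem, hle⟩
        have h1 : v ≤ x := hle x (by simp)
        have h2 : v = x := by simpa using hmem
        simp [h2]
    · have hm := (ih m).1 h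
      simp only [lmin, h, omin]
      constructor
      · intro hv
        have hv' : min x m = v := by simpa using hv
        subst hv'
        refine ⟨?_, ?_⟩
        · rcases le_total x m with h' | h'
          · simp [min_eq_left h']
          · right; rw [min_eq_right h']; exact hm.1
        · intro w hw
          rcases List.mem_cons.1 hw with rfl | hw'
          · exact min_le_left _ _
          · exact le_trans (min_le_right x m) (hm.2 w hw')
      · rintro ⟨hmem, hle⟩
        have h1 : v ≤ x := hle x (List.mem_cons_self)
        have h2 : v ≤ m := hle m (List.mem_cons_of_mem x hm.1)
        have h3 : min x m ≤ v := by
          rcases List.mem_cons.1 hmem with rfl | hmem'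
          · exact min_le_left _ _
          · exact le_trans (min_le_right x m) (hm.2 v hmem')
        have : min x m = v := le_antisymm h3 (le_min h1 h2)
        simp [this]

theorem lmin_cong (lim : Int) (L1 L2 : List Int)
    (h1 : ∀ v ∈ L1, v ≤ lim → ∃ w ∈ L2, w ≤ v)
    (h2 : ∀ v ∈ L2, v ≤ lim → ∃ w ∈ L1, w ≤ v) :
    phi lim (lmin L1) = phi lim (lmin L2) := by
  rcases e1 : lmin L1 with _ | v1 <;> rcases e2 : lmin L2 with _ | v2
  · rfl
  · have hL1 : L1 = [] := (lmin_eq_none_iff L1).1 e1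
    subst hL1
    obtain ⟨hv2, _⟩ := (lmin_eq_some_iff L2 v2).1 e2
    simp only [phi]
    split_ifs with hc
    · obtain ⟨w, hw, _⟩ := h2 v2 hv2 hc; simp at hw
    · rfl
  · have hL2 : L2 = [] := (lmin_eq_none_iff L2).1 e2
    subst hL2
    obtain ⟨hv1, _⟩ := (lmin_eq_some_iff L1 v1).1 e1
    simp only [phi]
    split_ifs with hc
    · obtain ⟨w, hw, _⟩ := h1 v1 hv1 hc; simp at hw
    · rfl
  · obtain ⟨hv1, hmin1⟩ := (lmin_eq_some_iff L1 v1).1 e1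
    obtain ⟨hv2, hmin2⟩ := (lmin_eq_some_iff L2 v2).1 e2
    simp only [phi]
    by_cases hc1 : v1 ≤ lim
    · obtain ⟨w, hw, hwle⟩ := h1 v1 hv1 hc1
      have hle21 : v2 ≤ v1 := le_trans (hmin2 w hw) hwle
      obtain ⟨w', hw', hwle'⟩ := h2 v2 hv2 (le_trans hle21 hc1)
      have hle12 : v1 ≤ v2 := le_trans (hmin1 w' hw') hwle'
      have hvv : v1 = v2 := le_antisymm hle12 hle21
      subst hvv; rfl
    · by_cases hc2 : v2 ≤ lim
      · obtain ⟨w, hw, hwle⟩ := h2 v2 hv2 hc2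
        have := hmin1 w hw
        omega
      · rw [if_neg hc1, if_neg hc2]

theorem minTo_nonneg (g : List Bool) : ∀ (P : List (List Int)) (c : List Bool) (k : Int),
    minTo g c P = some k → 0 ≤ k := by
  intro P
  induction P with
  | nil => intro c k h; simp only [minTo] at h; split at h <;> simp_all
  | cons sw rest ih =>
    intro c k h
    simp only [minTo] at h
    rcases omin_eq_some _ _ _ h with h' | h'
    · exact ih c k h'
    · rcases e : minTo g (toggleAll c sw) rest with _ | m <;> simp [e] at h'
      have := ih _ _ e; omega

theorem minTo_self (g : List Bool) : ∀ (P : List (List Int)), minTo g g P = some 0 := by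
  intro P
  induction P with
  | nil => simp [minTo]
  | cons sw rest ih =>
    simp only [minTo, ih]
    rcases e : (minTo g (toggleAll g sw) rest) with _ | m
    · simp [omin]
    · have := minTo_nonneg g rest _ _ e
      simp [omin]; omega

theorem minTo_pos (g : List Bool) : ∀ (P : List (List Int)) (c : List Bool) (k : Int),
    g ≠ c → minTo g c P = some k → 1 ≤ k := by
  intro P
  induction P with
  | nil => intro c k hne h; simp [minTo, hne] at h
  | cons sw rest ih =>
    intro c k hne h
    simp only [minTo] at h
    rcases omin_eq_some _ _ _ h with h' | h'
    · exact ih c k hne h'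
    · rcases e : minTo g (toggleAll c sw) rest with _ | m <;> simp [e] at h'
      have := minTo_nonneg g rest _ _ e; omega

theorem minTo_eq_minTo1 (g : List Bool) : ∀ (P : List (List Int)) (c : List Bool),
    g ≠ c → minTo g c P = minTo1 g c P := by
  intro P
  induction P with
  | nil => intro c hne; simp [minTo, minTo1, hne]
  | cons sw rest ih => intro c hne; simp only [minTo, minTo1, ih c hne]

theorem clampL_le_1000 (md d : Int) (o : Option Int) : clampL md d o ≤ 1000 := by
  rcases o with _ | k <;> simp [clampL] <;> split <;> omega

theorem clampL_omin (md d : Int) (a b : Option Int) :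
    clampL md d (omin a b) = min (clampL md d a) (clampL md d b) := by
  rcases a with _ | x <;> rcases b with _ | y <;>
    simp [clampL, omin, min_def] <;> split_ifs <;> omega

-- A's recursion computes clampL of the minimal subset size
theorem A_char (g : List Bool) (md : Int) : ∀ (sws : List (List Int)),
    (∀ (c : List Bool) (d best : Int), g ≠ c → d ≤ md → best ≤ 1000 →
      fmhLoopA g c sws d md best = min best (clampL md d (minTo1 g c sws)))
    ∧ (∀ (c : List Bool) (d : Int), find_min_helper g c sws d md =
        if g = c then d else if d > md then 1000 else clampL md d (minTo g c sws)) := by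
  intro sws
  induction sws with
  | nil =>
    have hloop : ∀ (c : List Bool) (d best : Int), g ≠ c → d ≤ md → best ≤ 1000 →
        fmhLoopA g c [] d md best = min best (clampL md d (minTo1 g c [])) := by
      intro c d best _ _ hb
      rw [fmhLoopA]
      simp only [minTo1, clampL]
      omega
    refine ⟨hloop, ?_⟩
    intro c d
    rw [find_min_helper]
    split_ifs with h1 h2
    · rfl
    · rfl
    · rw [hloop c d 1000 h1 (by omega) (by omega)]
      simp [minTo1, minTo, h1, clampL]
  | cons sw rest ih =>
    have hloop : ∀ (c : List Bool) (d best : Int), g ≠ c → d ≤ md → best ≤ 1000 →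
        fmhLoopA g c (sw :: rest) d md best = min best (clampL md d (minTo1 g c (sw :: rest))) := by
      intro c d best hne hd hb
      rw [fmhLoopA]
      have hb' : min best (find_min_helper g (sw.foldl pyToggleIdx c) rest (d + 1) md) ≤ 1000 :=
        le_trans (min_le_left _ _) hb
      rw [ih.1 c d _ hne hd hb']
      have hX1000 : clampL md d (minTo1 g c rest) ≤ 1000 := clampL_le_1000 _ _ _
      have key : min (find_min_helper g (sw.foldl pyToggleIdx c) rest (d + 1) md)
            (clampL md d (minTo1 g c rest))
          = min (clampL md d (minTo1 g c rest))
            (clampL md d ((minTo g (sw.foldl pyToggleIdx c) rest).map (· + 1))) := by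
        rw [ih.2 (sw.foldl pyToggleIdx c) (d + 1)]
        generalize hXg : clampL md d (minTo1 g c rest) = X at hX1000 ⊢
        split_ifs with hgc' hdm
        · -- the toggled state is the goal: one press suffices
          rw [← hgc', minTo_self]
          simp only [Option.map_some]
          have h01 : ((0 : Int) + 1) = 1 := by omega
          rw [h01]
          simp only [clampL]
          rw [if_pos (by omega : (1:Int) ≤ md - d + 1)]
          simp only [min_def]
          split_ifs <;> omega
        · -- depth cut: d = md, deeper solutions cost ≥ 2 presses
          rcases e : minTo g (sw.foldl pyToggleIdx c) rest with _ | k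
          · simp only [Option.map_none, clampL, min_def]
            split_ifs <;> omega
          · have hk := minTo_pos g rest _ k hgc' e
            simp only [Option.map_some, clampL]
            rw [if_neg (by omega : ¬ (k + 1 ≤ md - d + 1))]
            simp only [min_def]
            split_ifs <;> omega
        · rcases e : minTo g (sw.foldl pyToggleIdx c) rest with _ | k
          · simp only [Option.map_none, clampL, min_def]
            split_ifs <;> omega
          · simp only [Option.map_some, clampL]
            split_ifs with ha hb' hb' <;> simp only [min_def] <;> split_ifs <;> omega
      calc min (min best (find_min_helper g (sw.foldl pyToggleIdx c) rest (d + 1) md))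
            (clampL md d (minTo1 g c rest))
          = min best (min (find_min_helper g (sw.foldl pyToggleIdx c) rest (d + 1) md)
              (clampL md d (minTo1 g c rest))) := by rw [min_assoc]
        _ = min best (min (clampL md d (minTo1 g c rest))
              (clampL md d ((minTo g (sw.foldl pyToggleIdx c) rest).map (· + 1)))) := by rw [key]
        _ = min best (clampL md d (minTo1 g c (sw :: rest))) := by
              have : minTo1 g c (sw :: rest)
                  = omin (minTo1 g c rest) ((minTo g (toggleAll c sw) rest).map (· + 1)) := rfl
              rw [this, clampL_omin]
              rfl
    refine ⟨hloop, ?_⟩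
    intro c d
    rw [find_min_helper]
    split_ifs with h1 h2
    · rfl
    · rfl
    · rw [hloop c d 1000 h1 (by omega) (by omega)]
      rw [← minTo_eq_minTo1 g (sw :: rest) c h1]
      have := clampL_le_1000 md d (minTo g c (sw :: rest))
      simp only [min_def]
      split_ifs <;> omega


-- ===== B-side: the DP dict computes phi of the same minimal press count =====

def GoodDp (lim : Int) (dp : PySem.Dict (List Bool) Int) : Prop :=
  dp.keys.Nodup ∧ ∀ p ∈ dp.items, 0 ≤ p.2 ∧ p.2 ≤ lim

-- candidate totals: p.2 presses already spent to reach p.1, finish using `rest`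
def candL (g : List Bool) (l : List (List Bool × Int)) (rest : List (List Int)) : List Int :=
  l.filterMap (fun p => (minTo g p.1 rest).map (· + p.2))

theorem mem_candL (g : List Bool) (l : List (List Bool × Int)) (rest : List (List Int)) (v : Int) :
    v ∈ candL g l rest ↔ ∃ p ∈ l, ∃ m, minTo g p.1 rest = some m ∧ v = m + p.2 := by
  simp only [candL, List.mem_filterMap, Option.map_eq_some_iff]
  constructor
  · rintro ⟨p, hp, m, hm, rfl⟩; exact ⟨p, hp, m, hm, rfl⟩
  · rintro ⟨p, hp, m, hm, rfl⟩; exact ⟨p, hp, m, hm, rfl⟩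

theorem bstep_nodup (lim : Int) (sw : List Int) (new : PySem.Dict (List Bool) Int)
    (p : List Bool × Int) (h : new.keys.Nodup) : (bstep lim sw new p).keys.Nodup := by
  simp only [bstep]
  split_ifs with h1
  · rcases e : new.get? (List.foldl pyToggleIdx p.1 sw) with _ | v <;> simp only [e]
    · exact PySem.Dict.nodup_keys_insert _ _ _ h
    · split_ifs with h2
      · exact PySem.Dict.nodup_keys_insert _ _ _ h
      · exact h
  · exact h

theorem bstep_bounds (lim : Int) (sw : List Int) (new : PySem.Dict (List Bool) Int)
    (p : List Bool × Int) (hp : 0 ≤ p.2)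
    (h : ∀ q ∈ new.items, 0 ≤ q.2 ∧ q.2 ≤ lim) :
    ∀ q ∈ (bstep lim sw new p).items, 0 ≤ q.2 ∧ q.2 ≤ lim := by
  intro q hq
  simp only [bstep] at hq
  split_ifs at hq with h1
  · rcases e : new.get? (List.foldl pyToggleIdx p.1 sw) with _ | v <;> simp only [e] at hq
    · rcases (PySem.Dict.mem_items_insert _ _ _ _).1 hq with rfl | ⟨hq', _⟩
      · constructor <;> simp <;> omega
      · exact h q hq'
    · split_ifs at hq with h2
      · rcases (PySem.Dict.mem_items_insert _ _ _ _).1 hq with rfl | ⟨hq', _⟩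
        · constructor <;> simp <;> omega
        · exact h q hq'
      · exact h q hq
  · exact h q hq

theorem bstep_mono (lim : Int) (sw : List Int) (new : PySem.Dict (List Bool) Int)
    (p : List Bool × Int) (h : new.keys.Nodup) :
    ∀ q ∈ new.items, ∃ q' ∈ (bstep lim sw new p).items, q'.1 = q.1 ∧ q'.2 ≤ q.2 := by
  intro q hq
  simp only [bstep]
  split_ifs with h1
  · rcases e : new.get? (List.foldl pyToggleIdx p.1 sw) with _ | v <;> simp only [e]
    · -- new key: q is untouched
      refine ⟨q, ?_, rfl, le_refl _⟩
      refine (PySem.Dict.mem_items_insert _ _ _ _).2 (Or.inr ⟨hq, ?_⟩)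
      intro hk
      have : new.get? q.1 = some q.2 := PySem.Dict.get?_of_mem_items _ (by exact hq) h
      rw [hk, e] at this; cases this
    · split_ifs with h2
      · by_cases hk : q.1 = List.foldl pyToggleIdx p.1 sw
        · -- q is the overwritten entry: its value was v > nc
          have hv : new.get? q.1 = some q.2 := PySem.Dict.get?_of_mem_items _ (by exact hq) h
          rw [hk, e] at hv
          injection hv with hv
          refine ⟨(List.foldl pyToggleIdx p.1 sw, p.2 + 1), PySem.Dict.mem_items_insert_self _ _ _, by simp [hk], ?_⟩
          simp; omega
        · exact ⟨q, (PySem.Dict.mem_items_insert _ _ _ _).2 (Or.inr ⟨hq, hk⟩), rfl, le_refl _⟩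
      · exact ⟨q, hq, rfl, le_refl _⟩
  · exact ⟨q, hq, rfl, le_refl _⟩

theorem bstep_mem (lim : Int) (sw : List Int) (new : PySem.Dict (List Bool) Int)
    (p : List Bool × Int) :
    ∀ q ∈ (bstep lim sw new p).items,
      q ∈ new.items ∨ (q = (toggleAll p.1 sw, p.2 + 1) ∧ p.2 + 1 ≤ lim) := by
  intro q hq
  simp only [bstep] at hq
  split_ifs at hq with h1
  · rcases e : new.get? (List.foldl pyToggleIdx p.1 sw) with _ | v <;> simp only [e] at hq
    · rcases (PySem.Dict.mem_items_insert _ _ _ _).1 hq with rfl | ⟨hq', _⟩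
      · exact Or.inr ⟨rfl, h1⟩
      · exact Or.inl hq'
    · split_ifs at hq with h2
      · rcases (PySem.Dict.mem_items_insert _ _ _ _).1 hq with rfl | ⟨hq', _⟩
        · exact Or.inr ⟨rfl, h1⟩
        · exact Or.inl hq'
      · exact Or.inl hq
  · exact Or.inl hq

theorem bstep_cand (lim : Int) (sw : List Int) (new : PySem.Dict (List Bool) Int)
    (p : List Bool × Int) (h : new.keys.Nodup) (hle : p.2 + 1 ≤ lim) :
    ∃ q' ∈ (bstep lim sw new p).items, q'.1 = toggleAll p.1 sw ∧ q'.2 ≤ p.2 + 1 := by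
  simp only [bstep]
  rw [if_pos hle]
  rcases e : new.get? (List.foldl pyToggleIdx p.1 sw) with _ | v <;> simp only [e]
  · exact ⟨(List.foldl pyToggleIdx p.1 sw, p.2 + 1), PySem.Dict.mem_items_insert_self _ _ _, rfl, le_refl _⟩
  · split_ifs with h2
    · exact ⟨(List.foldl pyToggleIdx p.1 sw, p.2 + 1), PySem.Dict.mem_items_insert_self _ _ _, rfl, le_refl _⟩
    · exact ⟨(List.foldl pyToggleIdx p.1 sw, v), PySem.Dict.mem_items_of_get?_eq_some _ e, rfl, by omega⟩

theorem fold_nodup (lim : Int) (sw : List Int) : ∀ (l : List (List Bool × Int))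
    (acc : PySem.Dict (List Bool) Int), acc.keys.Nodup →
    (l.foldl (bstep lim sw) acc).keys.Nodup := by
  intro l
  induction l with
  | nil => intro acc h; exact h
  | cons p l' ih => intro acc h; exact ih _ (bstep_nodup lim sw acc p h)

theorem fold_bounds (lim : Int) (sw : List Int) : ∀ (l : List (List Bool × Int))
    (acc : PySem.Dict (List Bool) Int), (∀ p ∈ l, 0 ≤ p.2) →
    (∀ q ∈ acc.items, 0 ≤ q.2 ∧ q.2 ≤ lim) →
    ∀ q ∈ (l.foldl (bstep lim sw) acc).items, 0 ≤ q.2 ∧ q.2 ≤ lim := by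
  intro l
  induction l with
  | nil => intro acc _ h; exact h
  | cons p l' ih =>
    intro acc hl h
    exact ih _ (fun p' hp' => hl p' (List.mem_cons_of_mem _ hp'))
      (bstep_bounds lim sw acc p (hl p List.mem_cons_self) h)

theorem fold_mono (lim : Int) (sw : List Int) : ∀ (l : List (List Bool × Int))
    (acc : PySem.Dict (List Bool) Int), acc.keys.Nodup →
    ∀ q ∈ acc.items, ∃ q' ∈ (l.foldl (bstep lim sw) acc).items, q'.1 = q.1 ∧ q'.2 ≤ q.2 := by
  intro l
  induction l with
  | nil => intro acc _ q hq; exact ⟨q, hq, rfl, le_refl _⟩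
  | cons p l' ih =>
    intro acc h q hq
    obtain ⟨q1, hq1, hk1, hv1⟩ := bstep_mono lim sw acc p h q hq
    obtain ⟨q', hq', hk', hv'⟩ := ih (bstep lim sw acc p) (bstep_nodup lim sw acc p h) q1 hq1
    exact ⟨q', hq', by rw [hk', hk1], le_trans hv' hv1⟩

theorem fold_mem (lim : Int) (sw : List Int) : ∀ (l : List (List Bool × Int))
    (acc : PySem.Dict (List Bool) Int),
    ∀ q ∈ (l.foldl (bstep lim sw) acc).items,
      q ∈ acc.items ∨ ∃ p ∈ l, q = (toggleAll p.1 sw, p.2 + 1) ∧ p.2 + 1 ≤ lim := by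
  intro l
  induction l with
  | nil => intro acc q hq; exact Or.inl hq
  | cons p l' ih =>
    intro acc q hq
    rcases ih (bstep lim sw acc p) q hq with h' | ⟨p', hp', he⟩
    · rcases bstep_mem lim sw acc p q h' with h'' | h''
      · exact Or.inl h''
      · exact Or.inr ⟨p, List.mem_cons_self, h''⟩
    · exact Or.inr ⟨p', List.mem_cons_of_mem _ hp', he⟩

theorem fold_cand (lim : Int) (sw : List Int) : ∀ (l : List (List Bool × Int))
    (acc : PySem.Dict (List Bool) Int), acc.keys.Nodup →
    ∀ p ∈ l, p.2 + 1 ≤ lim →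
      ∃ q' ∈ (l.foldl (bstep lim sw) acc).items, q'.1 = toggleAll p.1 sw ∧ q'.2 ≤ p.2 + 1 := by
  intro l
  induction l with
  | nil => intro acc _ p hp; cases hp
  | cons p0 l' ih =>
    intro acc h p hp hle
    rcases List.mem_cons.1 hp with rfl | hp'
    · obtain ⟨q1, hq1, hk1, hv1⟩ := bstep_cand lim sw acc p h hle
      obtain ⟨q', hq', hk', hv'⟩ := fold_mono lim sw l' (bstep lim sw acc p)
        (bstep_nodup lim sw acc p h) q1 hq1
      exact ⟨q', hq', by rw [hk', hk1], le_trans hv' hv1⟩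
    · exact ih (bstep lim sw acc p0) (bstep_nodup lim sw acc p0 h) p hp' hle

theorem bouter_good (lim : Int) (dp : PySem.Dict (List Bool) Int) (sw : List Int)
    (hG : GoodDp lim dp) : GoodDp lim (bouter lim dp sw) := by
  refine ⟨fold_nodup lim sw dp.items dp hG.1, ?_⟩
  exact fold_bounds lim sw dp.items dp (fun p hp => (hG.2 p hp).1) hG.2

theorem step_char (g : List Bool) (lim : Int) (dp : PySem.Dict (List Bool) Int)
    (sw : List Int) (rest : List (List Int)) (hG : GoodDp lim dp) :
    phi lim (lmin (candL g (bouter lim dp sw).items rest))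
      = phi lim (lmin (candL g dp.items (sw :: rest))) := by
  apply lmin_cong
  · -- every candidate of the new dict is justified by an old candidate
    intro v hv _
    obtain ⟨p', hp', m, hm, rfl⟩ := (mem_candL _ _ _ _).1 hv
    rcases fold_mem lim sw dp.items dp p' hp' with hmem | ⟨p, hp, rfl, _⟩
    · obtain ⟨m', hm', hle⟩ := omin_le_left m ((minTo g (toggleAll p'.1 sw) rest).map (· + 1))
      refine ⟨m' + p'.2, (mem_candL _ _ _ _).2 ⟨p', hmem, m', ?_, rfl⟩, by omega⟩
      simp only [minTo]; rw [hm]; exact hm'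
    · obtain ⟨m'', hm'', hle⟩ := omin_le_right (minTo g p.1 rest) (m + 1)
      have hm2 : minTo g (toggleAll p.1 sw) rest = some m := hm
      refine ⟨m'' + p.2, (mem_candL _ _ _ _).2 ⟨p, hp, m'', ?_, rfl⟩, by simp; omega⟩
      simp only [minTo, hm2, Option.map_some]
      exact hm''
  · -- every old candidate is dominated by a candidate of the new dict
    intro v hv hvlim
    obtain ⟨p, hp, m, hm, rfl⟩ := (mem_candL _ _ _ _).1 hv
    simp only [minTo] at hm
    rcases omin_eq_some _ _ _ hm with h' | h'
    · obtain ⟨q', hq', hk', hv'⟩ := fold_mono lim sw dp.items dp hG.1 p hp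
      refine ⟨m + q'.2, (mem_candL _ _ _ _).2 ⟨q', hq', m, by rw [hk']; exact h', rfl⟩, by omega⟩
    · rcases e : minTo g (toggleAll p.1 sw) rest with _ | mm
      · rw [e] at h'; cases h'
      · rw [e] at h'
        simp only [Option.map_some] at h'
        injection h' with h'
        have hmm : 0 ≤ mm := minTo_nonneg g rest _ _ e
        have hp2 : 0 ≤ p.2 ∧ p.2 ≤ lim := hG.2 p hp
        have hple : p.2 + 1 ≤ lim := by omega
        obtain ⟨q', hq', hk', hv'⟩ := fold_cand lim sw dp.items dp hG.1 p hp hple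
        refine ⟨mm + q'.2, (mem_candL _ _ _ _).2 ⟨q', hq', mm, by rw [hk']; exact e, rfl⟩, by omega⟩

theorem fold_char (g : List Bool) (lim : Int) : ∀ (sws : List (List Int))
    (dp : PySem.Dict (List Bool) Int), GoodDp lim dp →
    phi lim (lmin (candL g ((sws.foldl (bouter lim) dp)).items []))
      = phi lim (lmin (candL g dp.items sws)) := by
  intro sws
  induction sws with
  | nil => intro dp _; rfl
  | cons sw rest ih =>
    intro dp hG
    have h1 : (sw :: rest).foldl (bouter lim) dp = rest.foldl (bouter lim) (bouter lim dp sw) := rfl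
    rw [h1, ih (bouter lim dp sw) (bouter_good lim dp sw hG), step_char g lim dp sw rest hG]

theorem fold_good (lim : Int) : ∀ (sws : List (List Int)) (dp : PySem.Dict (List Bool) Int),
    GoodDp lim dp → GoodDp lim (sws.foldl (bouter lim) dp) := by
  intro sws
  induction sws with
  | nil => intro dp h; exact h
  | cons sw rest ih => intro dp h; exact ih _ (bouter_good lim dp sw h)

theorem dp0_items (c : List Bool) :
    (PySem.Dict.empty.insert c (0 : Int)).items = [(c, 0)] := by
  rw [PySem.Dict.items_insert_of_not_contains _ _ (PySem.Dict.contains_empty c)]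
  rfl

theorem E1 (g c : List Bool) (lim : Int) (sws : List (List Int)) :
    phi lim (lmin (candL g (PySem.Dict.empty.insert c (0 : Int)).items sws))
      = phi lim (minTo g c sws) := by
  rw [dp0_items]
  rcases e : minTo g c sws with _ | m
  · simp [candL, e, lmin]
  · simp [candL, e, lmin, omin]

theorem E2 (g : List Bool) (lim : Int) (F : PySem.Dict (List Bool) Int) (hG : GoodDp lim F) :
    phi lim (lmin (candL g F.items [])) = F.get? g := by
  rcases e : F.get? g with _ | k
  · have hnil : candL g F.items [] = [] := by
      simp only [candL]
      rw [List.filterMap_eq_nil_iff]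
      intro p hp
      simp only [minTo]
      split_ifs with hgp
      · exfalso
        have : g ∈ F.keys := by
          rw [hgp]; exact PySem.Dict.mem_keys_of_mem_items _ hp
        exact ((PySem.Dict.get?_eq_none_iff_not_mem_keys F g).1 e) this
      · rfl
    rw [hnil]
    rfl
  · have hmem : (g, k) ∈ F.items := PySem.Dict.mem_items_of_get?_eq_some _ e
    have hl : lmin (candL g F.items []) = some k := by
      rw [lmin_eq_some_iff]
      constructor
      · refine (mem_candL _ _ _ _).2 ⟨(g, k), hmem, 0, by simp [minTo], by omega⟩
      · intro w hw
        obtain ⟨p, hp, m, hm, rfl⟩ := (mem_candL _ _ _ _).1 hw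
        simp only [minTo] at hm
        split_ifs at hm with hgp
        · injection hm with hm
          have : F.get? p.1 = some p.2 := PySem.Dict.get?_of_mem_items _ (by exact hp) hG.1
          rw [← hgp, e] at this
          injection this with this
          omega
    rw [hl]
    have hk := hG.2 (g, k) hmem
    simp only [phi]
    rw [if_pos (by simpa using hk.2)]

-- ===== VERDICT (by name: the statement is the Claim_ definition above) =====
theorem find_min_helper_spec : Claim_equal_find_min_helper := by
  unfold Claim_equal_find_min_helper
  intro goal current switches depth max_depth _ _
  unfold Spec_find_min_helper
  rw [(A_char goal max_depth switches).2 current depth]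
  simp only [find_min_helper_alt]
  split_ifs with h1 h2
  · rfl
  · rfl
  · have hG0 : GoodDp (max_depth - depth + 1) (PySem.Dict.empty.insert current 0) := by
      constructor
      · exact PySem.Dict.nodup_keys_insert _ _ _ PySem.Dict.nodup_keys_empty
      · intro p hp
        rw [dp0_items] at hp
        simp only [List.mem_singleton] at hp
        subst hp
        constructor
        · exact le_refl 0
        · simp; omega
    have hGF := fold_good (max_depth - depth + 1) switches _ hG0
    have h := fold_char goal (max_depth - depth + 1) switches _ hG0
    rw [E2 goal _ _ hGF, E1] at h
    rcases e : minTo goal current switches with _ | k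
    · rw [e] at h
      simp only [phi] at h
      rw [h]
      simp [clampL]
    · rw [e] at h
      simp only [phi] at h
      split_ifs at h with hk
      · rw [h]
        simp [clampL, hk]
      · rw [h]
        simp only [clampL]
        rw [if_neg hk]
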